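-- pv_equiv track=rewrite | github.com/ValentinSiegert/AdventOfCode | 2025/day04.py | paper_stacks
-- ===== SOURCE A (Python) =====
-- def paper_stacks(data: str, p2: bool = False) -> int:
--     max_y, max_x, removed_papers, loop = len(grid := data.splitlines()), len(grid[0]), 0, True
--     while loop:
--         loop, accessible_papers = False, []
--         for lin_nr, line in enumerate(grid):
--             for col_nr in range(len(line)):
--                 pos, adjacent_papers = (col_nr, lin_nr), 0
--                 if grid[lin_nr][col_nr] != '@': continue
--                 for adjacent in [(0, -1), (0, 1), (-1, 0), (1, 0), (-1, -1), (1, -1), (-1, 1), (1, 1)]: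
--                     if 0 <= pos[0] + adjacent[0] < max_x and 0 <= pos[1] + adjacent[1] < max_y and \
--                        grid[pos[1] + adjacent[1]][pos[0] + adjacent[0]] == '@':
--                         adjacent_papers += 1
--                 if adjacent_papers < 4:
--                     accessible_papers.append(pos)
--         if not p2:
--             return len(accessible_papers)
--         for paper in accessible_papers:
--             grid[paper[1]] = grid[paper[1]][:paper[0]] + '.' + grid[paper[1]][paper[0]+1:]
--             removed_papers += 1
--             loop = True
--     return removed_papers
-- ===== SOURCE B (Python) =====
-- # B: frontier peeling over a coordinate set — after one full scan, each later round
-- # re-examines only the neighbours of the cells just removed, instead of rescanning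
-- # the whole grid and rebuilding rows by string slicing.
-- OFFSETS = [(0, -1), (0, 1), (-1, 0), (1, 0), (-1, -1), (1, -1), (-1, 1), (1, 1)]
--
--
-- def paper_stacks(data: str, p2: bool = False) -> int:
--     grid = data.splitlines()
--     max_y, max_x = len(grid), len(grid[0])
--     cells = {(x, y) for y, row in enumerate(grid) for x, ch in enumerate(row) if ch == '@'}
--
--     def degree(x, y):
--         return sum(1 for dx, dy in OFFSETS
--                    if 0 <= x + dx < max_x and 0 <= y + dy < max_y and (x + dx, y + dy) in cells)
--
--     light = {v for v in cells if degree(*v) < 4}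
--     if not p2:
--         return len(light)
--     removed = 0
--     while light:
--         removed += len(light)
--         cells -= light
--         cand = {(x - dx, y - dy) for (x, y) in light
--                 if 0 <= x < max_x and 0 <= y < max_y
--                 for dx, dy in OFFSETS} & cells
--         light = {v for v in cand if degree(*v) < 4}
--     return removed
-- ===== Notes on version B (the rewrite author's own statement) =====
-- stated objective: alternative
-- what changed: B indexes the paper cells in a coordinate set once and peels by frontier propagation: after the first full scan, each round re-examines only the neighbours of the cells removed in the previous round and subtracts sets, instead of rescanning the whole W*H grid and rebuilding rows by string slicing every round.
import Mathlib
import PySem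

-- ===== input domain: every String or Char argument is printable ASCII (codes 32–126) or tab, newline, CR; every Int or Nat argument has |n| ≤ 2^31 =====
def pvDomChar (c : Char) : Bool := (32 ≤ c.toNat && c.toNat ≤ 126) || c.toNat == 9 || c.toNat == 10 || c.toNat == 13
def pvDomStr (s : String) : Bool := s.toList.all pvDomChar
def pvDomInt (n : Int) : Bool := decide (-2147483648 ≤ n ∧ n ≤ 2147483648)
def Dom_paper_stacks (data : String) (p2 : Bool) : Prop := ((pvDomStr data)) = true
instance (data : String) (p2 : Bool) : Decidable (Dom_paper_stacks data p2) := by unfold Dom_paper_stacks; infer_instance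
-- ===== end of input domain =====

-- One honest line: B replaces A's per-round full-grid rescan and string surgery by a coordinate
-- set peeled by frontier propagation (only the neighbours of just-removed cells are re-examined).

-- ===== PORT A =====
-- the 8 neighbour offsets, in A's order
def pvOffA : List (Int × Int) := [(0, -1), (0, 1), (-1, 0), (1, 0), (-1, -1), (1, -1), (-1, 1), (1, 1)]

-- inner offset loop: adjacent_papers at pos (x, y); the pyGetD defaults stand for Python's
-- IndexError sites and are never returned on inputs satisfying Pre_
def pvAdjA (grid : List (List Char)) (mx my x y : Int) : Int :=
  pvOffA.foldl (fun n d =>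
    if 0 ≤ x + d.1 ∧ x + d.1 < mx ∧ 0 ≤ y + d.2 ∧ y + d.2 < my ∧
       PySem.List.pyGetD (PySem.List.pyGetD grid (y + d.2) []) (x + d.1) ' ' = '@'
    then n + 1 else n) 0

-- the nested scan building accessible_papers
def pvScanA (grid : List (List Char)) (mx my : Int) : List (Int × Int) :=
  (PySem.List.enumerate grid).foldl (fun acc ly =>
    (PySem.List.pyRange 0 (PySem.List.len ly.2)).foldl (fun acc2 col =>
      if PySem.List.pyGetD ly.2 col ' ' ≠ '@' then acc2
      else if pvAdjA grid mx my col ly.1 < 4 then acc2 ++ [(col, ly.1)] else acc2) acc) []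

-- grid[paper[1]] = grid[paper[1]][:paper[0]] + '.' + grid[paper[1]][paper[0]+1:]
-- (List.set with .toNat is exact: the row index comes from enumerate, so 0 ≤ it < len(grid))
def pvRemStepA (g : List (List Char)) (p : Int × Int) : List (List Char) :=
  g.set p.2.toNat
    (PySem.List.slice (PySem.List.pyGetD g p.2 []) none (some p.1) ++ ['.'] ++
     PySem.List.slice (PySem.List.pyGetD g p.2 []) (some (p.1 + 1)) none)

-- the while loop; state (grid, removed, loop); fuel bounds the iteration count only
-- (each iteration that loops again turns at least one '@' into '.')
def pvLoopA (p2 : Bool) (mx my : Int) : Nat → List (List Char) → Int → Int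
  | 0, _, removed => removed
  | fuel + 1, grid, removed =>
      let acc := pvScanA grid mx my
      if !p2 then (acc.length : Int)
      else
        let st := acc.foldl (fun (s : List (List Char) × Int × Bool) p =>
          (pvRemStepA s.1 p, s.2.1 + 1, true)) (grid, removed, false)
        if st.2.2 then pvLoopA p2 mx my fuel st.1 st.2.1 else st.2.1

def pvCountAtA (grid : List (List Char)) : Nat := (grid.map (fun r => r.count '@')).sum

def paper_stacks (data : String) (p2 : Bool) : Int :=
  let grid := PySem.Chars.splitlines data.toList
  let my : Int := (grid.length : Int)
  let mx : Int := ((PySem.List.pyGetD grid 0 []).length : Int)  -- grid[0]: IndexError on empty grid, excluded by Pre_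
  pvLoopA p2 mx my (pvCountAtA grid + 1) grid 0

-- ===== PORT B =====
def pvOffB : List (Int × Int) := [(0, -1), (0, 1), (-1, 0), (1, 0), (-1, -1), (1, -1), (-1, 1), (1, 1)]

-- degree(x, y): count of in-bounds neighbours present in the cell set
def pvDegB (cells : List (Int × Int)) (mx my x y : Int) : Int :=
  pvOffB.foldl (fun n d =>
    if 0 ≤ x + d.1 ∧ x + d.1 < mx ∧ 0 ≤ y + d.2 ∧ y + d.2 < my ∧ (x + d.1, y + d.2) ∈ cells
    then n + 1 else n) 0

-- {(x, y) for y, row in enumerate(grid) for x, ch in enumerate(row) if ch == '@'}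
def pvCellsB (grid : List (List Char)) : PySem.Set (Int × Int) :=
  PySem.Set.ofList ((PySem.List.enumerate grid).flatMap (fun yr =>
    (PySem.List.enumerate yr.2).filterMap (fun xc =>
      if xc.2 = '@' then some (xc.1, yr.1) else none)))

-- {v for v in cs if degree(*v) < 4}
def pvLightB (cells : PySem.Set (Int × Int)) (mx my : Int) : PySem.Set (Int × Int) :=
  PySem.Set.ofList (cells.filter (fun v => decide (pvDegB cells mx my v.1 v.2 < 4)))

-- {(x-dx, y-dy) for (x, y) in light if in bounds for dx, dy in OFFSETS} & cells
def pvCandB (light cells : PySem.Set (Int × Int)) (mx my : Int) : PySem.Set (Int × Int) :=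
  PySem.Set.inter
    (PySem.Set.ofList (light.flatMap (fun v =>
      if 0 ≤ v.1 ∧ v.1 < mx ∧ 0 ≤ v.2 ∧ v.2 < my then
        pvOffB.map (fun d => (v.1 - d.1, v.2 - d.2))
      else [])))
    cells

-- the while loop; fuel is a totality guard only (every iteration removes ≥ 1 cell)
def pvLoopB (mx my : Int) : Nat → PySem.Set (Int × Int) → PySem.Set (Int × Int) → Int → Int
  | 0, _, _, removed => removed
  | fuel + 1, cells, light, removed =>
      if light.isEmpty then removed
      else
        let removed' := removed + PySem.Set.len light
        let cells' := PySem.Set.diff cells light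
        let light' := PySem.Set.ofList ((pvCandB light cells' mx my).filter
          (fun v => decide (pvDegB cells' mx my v.1 v.2 < 4)))
        pvLoopB mx my fuel cells' light' removed'

def paper_stacks_alt (data : String) (p2 : Bool) : Int :=
  let grid := PySem.Chars.splitlines data.toList
  let my : Int := (grid.length : Int)
  let mx : Int := ((PySem.List.pyGetD grid 0 []).length : Int)  -- grid[0]: IndexError on empty grid, excluded by Pre_
  let cells := pvCellsB grid
  let light := pvLightB cells mx my
  if !p2 then PySem.Set.len light
  else pvLoopB mx my (cells.length + 1) cells light 0

-- ===== PRECONDITION & SPEC =====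
-- every '@' cell may probe its 8 in-bounds (w.r.t. len(grid[0]) × len(grid)) neighbours
def pvSafe (g : List (List Char)) (mx my : Int) : Prop :=
  ∀ y < g.length, ∀ x < (g.getD y []).length, (g.getD y []).getD x ' ' = '@' →
    ∀ d ∈ ([(0, -1), (0, 1), (-1, 0), (1, 0), (-1, -1), (1, -1), (-1, 1), (1, 1)] : List (Int × Int)),
      0 ≤ (x : Int) + d.1 ∧ (x : Int) + d.1 < mx ∧ 0 ≤ (y : Int) + d.2 ∧ (y : Int) + d.2 < my →
        ((x : Int) + d.1).toNat < (g.getD ((y : Int) + d.2).toNat []).length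

-- Pre_ excludes exactly the inputs where the Python A raises an IndexError: the empty grid
-- (data == ""), and ragged grids where some '@' probes a neighbour column beyond a shorter row.
def Pre_paper_stacks (data : String) (p2 : Bool) : Prop :=
  PySem.Chars.splitlines data.toList ≠ [] ∧
  pvSafe (PySem.Chars.splitlines data.toList)
    (((PySem.Chars.splitlines data.toList).getD 0 []).length : Int)
    ((PySem.Chars.splitlines data.toList).length : Int)

instance (data : String) (p2 : Bool) : Decidable (Pre_paper_stacks data p2) := by
  unfold Pre_paper_stacks pvSafe
  exact @instDecidableAnd _ _ (by infer_instance) (Nat.decidableBallLT _ _)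

def pvWitness_paper_stacks : String × Bool := ("@@.\n.@@", true)

def Spec_paper_stacks (data : String) (p2 : Bool) (out : Int) : Prop := out = paper_stacks_alt data p2
instance (data : String) (p2 : Bool) (out : Int) : Decidable (Spec_paper_stacks data p2 out) := by unfold Spec_paper_stacks; infer_instance

-- ===== CLAIM (what is proved, stated in full; the proofs are below) =====
def Claim_equal_paper_stacks : Prop := ∀ (data : String) (p2 : Bool), Dom_paper_stacks data p2 → Pre_paper_stacks data p2 → Spec_paper_stacks data p2 (paper_stacks data p2)

-- ===== LEMMAS AND PROOFS =====

-- canonical row-major list of '@'-cell coordinates (proof-side only)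
def pvRowPos (y : Int) : Int → List Char → List (Int × Int)
  | _, [] => []
  | s, c :: t => (if c = '@' then [(s, y)] else []) ++ pvRowPos y (s + 1) t

def pvCellsAux : Int → List (List Char) → List (Int × Int)
  | _, [] => []
  | s, r :: t => pvRowPos s 0 r ++ pvCellsAux (s + 1) t


-- the two ports spell out the same offset list
theorem pvOff_eq : pvOffB = pvOffA := rfl

theorem mem_pvRowPos (r : List Char) (y : Int) (s : Int) (p : Int × Int) :
    p ∈ pvRowPos y s r ↔ ∃ k : Nat, k < r.length ∧ r.getD k ' ' = '@' ∧ p = (s + (k : Int), y) := by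
  induction r generalizing s with
  | nil => simp [pvRowPos]
  | cons c t ih =>
    by_cases hc : c = '@' <;>
      simp only [pvRowPos, hc, if_true, if_false, List.mem_append, List.mem_singleton,
        List.not_mem_nil, false_or, ih] <;> constructor
    · rintro (rfl | ⟨k, hk, hk2, rfl⟩)
      · exact ⟨0, by simp, rfl, by simp⟩
      · refine ⟨k + 1, by simpa using hk, by simpa using hk2, ?_⟩
        simp only [Prod.mk.injEq, and_true]; push_cast; ring
    · rintro ⟨k, hk, hk2, rfl⟩
      cases k with
      | zero => left; simp
      | succ k =>
        right
        refine ⟨k, by simpa using hk, by simpa using hk2, ?_⟩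
        simp only [Prod.mk.injEq, and_true]; push_cast; ring
    · rintro ⟨k, hk, hk2, rfl⟩
      refine ⟨k + 1, by simpa using hk, by simpa using hk2, ?_⟩
      simp only [Prod.mk.injEq, and_true]; push_cast; ring
    · rintro ⟨k, hk, hk2, rfl⟩
      cases k with
      | zero => exact absurd (by simpa using hk2) hc
      | succ k =>
        refine ⟨k, by simpa using hk, by simpa using hk2, ?_⟩
        simp only [Prod.mk.injEq, and_true]; push_cast; ring

theorem pvRowPos_filterMap (r : List Char) (y s : Int) :
    (PySem.List.enumerate r s).filterMap (fun xc => if xc.2 = '@' then some (xc.1, y) else none)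
      = pvRowPos y s r := by
  induction r generalizing s with
  | nil => simp [pvRowPos, PySem.List.enumerate_nil]
  | cons c t ih =>
    rw [PySem.List.enumerate_cons]
    by_cases hc : c = '@' <;> simp [pvRowPos, hc, ih]

theorem pvRowPos_fst_lt (r : List Char) (y s : Int) :
    (pvRowPos y s r).Pairwise (fun a b => a.1 < b.1) := by
  induction r generalizing s with
  | nil => simp [pvRowPos]
  | cons c t ih =>
    have hmem : ∀ q ∈ pvRowPos y (s + 1) t, s < q.1 := by
      intro q hq
      rcases (mem_pvRowPos t y (s + 1) q).1 hq with ⟨k, _, _, rfl⟩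
      simp; omega
    by_cases hc : c = '@'
    · simp only [pvRowPos, hc, if_true, List.singleton_append]
      exact List.Pairwise.cons (fun q hq => hmem q hq) (ih (s + 1))
    · simp only [pvRowPos, hc, if_false, List.nil_append]
      exact ih (s + 1)

theorem nodup_pvRowPos (r : List Char) (y s : Int) : (pvRowPos y s r).Nodup := by
  exact (pvRowPos_fst_lt r y s).imp (fun h => by rintro rfl; omega)

theorem pvCellsAux_eq_flatMap (g : List (List Char)) (s : Int) :
    (PySem.List.enumerate g s).flatMap (fun yr =>
      (PySem.List.enumerate yr.2).filterMap (fun xc =>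
        if xc.2 = '@' then some (xc.1, yr.1) else none)) = pvCellsAux s g := by
  induction g generalizing s with
  | nil => simp [pvCellsAux, PySem.List.enumerate_nil]
  | cons r t ih =>
    rw [PySem.List.enumerate_cons]
    simp only [List.flatMap_cons, pvCellsAux, ih]
    rw [pvRowPos_filterMap]

theorem mem_pvCellsAux (g : List (List Char)) (s : Int) (p : Int × Int) :
    p ∈ pvCellsAux s g ↔ ∃ j k : Nat, j < g.length ∧ k < (g.getD j []).length ∧
      (g.getD j []).getD k ' ' = '@' ∧ p = ((k : Int), s + (j : Int)) := by
  induction g generalizing s with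
  | nil => simp [pvCellsAux]
  | cons r t ih =>
    simp only [pvCellsAux, List.mem_append, mem_pvRowPos, ih]
    constructor
    · rintro (⟨k, hk, hk2, rfl⟩ | ⟨j, k, hj, hk, hk2, rfl⟩)
      · exact ⟨0, k, by simp, by simpa using hk, by simpa using hk2, by simp⟩
      · refine ⟨j + 1, k, by simpa using hj, by simpa using hk, by simpa using hk2, ?_⟩
        simp only [Prod.mk.injEq, true_and]; push_cast; ring
    · rintro ⟨j, k, hj, hk, hk2, rfl⟩
      cases j with
      | zero => exact Or.inl ⟨k, by simpa using hk, by simpa using hk2, by simp⟩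
      | succ j =>
        refine Or.inr ⟨j, k, by simpa using hj, by simpa using hk, by simpa using hk2, ?_⟩
        simp only [Prod.mk.injEq, true_and]; push_cast; ring

theorem nodup_pvCellsAux (g : List (List Char)) (s : Int) : (pvCellsAux s g).Nodup := by
  induction g generalizing s with
  | nil => simp [pvCellsAux]
  | cons r t ih =>
    simp only [pvCellsAux]
    refine (nodup_pvRowPos r s 0).append (ih (s + 1)) ?_
    intro p hp hq
    rcases (mem_pvRowPos r s 0 p).1 hp with ⟨k, _, _, rfl⟩
    rcases (mem_pvCellsAux t (s + 1) _).1 hq with ⟨j, k', _, _, _, heq⟩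
    have := congrArg Prod.snd heq
    simp at this
    omega

theorem length_pvCellsAux (g : List (List Char)) (s : Int) :
    (pvCellsAux s g).length = pvCountAtA g := by
  have hrow : ∀ (r : List Char) (y s : Int), (pvRowPos y s r).length = r.count '@' := by
    intro r
    induction r with
    | nil => simp [pvRowPos]
    | cons c t ih =>
      intro y s
      by_cases hc : c = '@' <;>
        simp [pvRowPos, hc, ih]
  induction g generalizing s with
  | nil => simp [pvCellsAux, pvCountAtA]
  | cons r t ih =>
    have := ih (s + 1)
    simp only [pvCellsAux, List.length_append, hrow, pvCountAtA, List.map_cons,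
      List.sum_cons] at this ⊢
    omega

theorem pvScan_row (g : List (List Char)) (mx my : Int) (yI : Int) (line : List Char) :
    ∀ (s : Int) (acc : List (Int × Int)),
      (PySem.List.enumerate line s).foldl (fun acc2 xc =>
          if xc.2 ≠ '@' then acc2
          else if pvAdjA g mx my xc.1 yI < 4 then acc2 ++ [(xc.1, yI)] else acc2) acc
        = acc ++ (pvRowPos yI s line).filter (fun p => decide (pvAdjA g mx my p.1 p.2 < 4)) := by
  induction line with
  | nil => intro s acc; simp [PySem.List.enumerate_nil, pvRowPos]
  | cons c t ih =>
    intro s acc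
    rw [PySem.List.enumerate_cons, List.foldl_cons, ih (s + 1)]
    by_cases hc : c = '@'
    · by_cases hadj : pvAdjA g mx my s yI < 4 <;>
        simp [hc, hadj, pvRowPos]
    · simp [hc, pvRowPos]

theorem pvScan_outer (g : List (List Char)) (mx my : Int) (t : List (List Char)) :
    ∀ (s : Int) (acc : List (Int × Int)),
      (PySem.List.enumerate t s).foldl (fun acc ly =>
        (PySem.List.pyRange 0 (PySem.List.len ly.2)).foldl (fun acc2 col =>
          if PySem.List.pyGetD ly.2 col ' ' ≠ '@' then acc2
          else if pvAdjA g mx my col ly.1 < 4 then acc2 ++ [(col, ly.1)] else acc2) acc) acc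
      = acc ++ (pvCellsAux s t).filter (fun p => decide (pvAdjA g mx my p.1 p.2 < 4)) := by
  induction t with
  | nil => intro s acc; simp [PySem.List.enumerate_nil, pvCellsAux]
  | cons r rest ih =>
    intro s acc
    rw [PySem.List.enumerate_cons]
    simp only [List.foldl_cons]
    have hmap := PySem.List.enumerate_eq_map_pyRange r ' '
    have hrow : (PySem.List.pyRange 0 (PySem.List.len r)).foldl (fun acc2 col =>
        if PySem.List.pyGetD r col ' ' ≠ '@' then acc2
        else if pvAdjA g mx my col s < 4 then acc2 ++ [(col, s)] else acc2) acc
        = acc ++ (pvRowPos s 0 r).filter (fun p => decide (pvAdjA g mx my p.1 p.2 < 4)) := by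
      rw [← pvScan_row g mx my s r 0 acc, hmap, List.foldl_map]
    rw [hrow, ih (s + 1)]
    simp [pvCellsAux, List.filter_append]

theorem pvScanA_eq (g : List (List Char)) (mx my : Int) :
    pvScanA g mx my = (pvCellsAux 0 g).filter (fun p => decide (pvAdjA g mx my p.1 p.2 < 4)) := by
  have := pvScan_outer g mx my g 0 []
  simpa [pvScanA] using this

theorem nodup_pvScanA (g : List (List Char)) (mx my : Int) : (pvScanA g mx my).Nodup := by
  rw [pvScanA_eq]; exact (nodup_pvCellsAux g 0).filter _

theorem pvAdj_eq_deg (g : List (List Char)) (mx my : Int)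
    (hs : pvSafe g mx my) (hmy : my = (g.length : Int)) (x y : Nat)
    (hy : y < g.length) (hx : x < (g.getD y []).length) (hc : (g.getD y []).getD x ' ' = '@') :
    pvAdjA g mx my (x : Int) (y : Int) = pvDegB (pvCellsAux 0 g) mx my (x : Int) (y : Int) := by
  unfold pvAdjA pvDegB
  rw [pvOff_eq]
  apply PySem.List.foldl_congr_mem
  intro acc d hd
  have hiff : (0 ≤ (x : Int) + d.1 ∧ (x : Int) + d.1 < mx ∧ 0 ≤ (y : Int) + d.2 ∧ (y : Int) + d.2 < my ∧
        PySem.List.pyGetD (PySem.List.pyGetD g ((y : Int) + d.2) []) ((x : Int) + d.1) ' ' = '@')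
      ↔ (0 ≤ (x : Int) + d.1 ∧ (x : Int) + d.1 < mx ∧ 0 ≤ (y : Int) + d.2 ∧ (y : Int) + d.2 < my ∧
        ((x : Int) + d.1, (y : Int) + d.2) ∈ pvCellsAux 0 g) := by
    constructor
    · rintro ⟨h1, h2, h3, h4, h5⟩
      refine ⟨h1, h2, h3, h4, ?_⟩
      rw [PySem.List.pyGetD_of_nonneg _ _ h3, PySem.List.pyGetD_of_nonneg _ _ h1] at h5
      have hb := hs y hy x hx hc d (by simpa [pvOffA] using hd) ⟨h1, h2, h3, h4⟩
      rw [mem_pvCellsAux]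
      refine ⟨((y : Int) + d.2).toNat, ((x : Int) + d.1).toNat, by omega, hb, h5, ?_⟩
      simp only [Prod.mk.injEq]
      omega
    · rintro ⟨h1, h2, h3, h4, h5⟩
      refine ⟨h1, h2, h3, h4, ?_⟩
      rw [PySem.List.pyGetD_of_nonneg _ _ h3, PySem.List.pyGetD_of_nonneg _ _ h1]
      rw [mem_pvCellsAux] at h5
      obtain ⟨j, k, hj, hk, hk2, heq⟩ := h5
      have h1' : (x : Int) + d.1 = (k : Int) := (Prod.mk.injEq _ _ _ _ ▸ heq) |>.1
      have h2' : (y : Int) + d.2 = (j : Int) := by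
        have := (Prod.mk.injEq _ _ _ _ ▸ heq).2
        omega
      have : ((x : Int) + d.1).toNat = k := by omega
      have hj' : ((y : Int) + d.2).toNat = j := by omega
      rw [this, hj']
      exact hk2
  exact if_congr hiff rfl rfl

def pvRemoveAll (g : List (List Char)) (acc : List (Int × Int)) : List (List Char) :=
  acc.foldl pvRemStepA g

theorem pvSurgery_getD (row : List Char) (x : Nat) (hx : x < row.length) (k : Nat) :
    (row.take x ++ '.' :: row.drop (x + 1)).getD k ' '
      = if k = x then '.' else row.getD k ' ' := by
  have htk : (row.take x).length = x := by rw [List.length_take]; omega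
  rcases lt_trichotomy k x with h | rfl | h
  · rw [List.getD_eq_getElem?_getD, List.getElem?_append_left (by omega),
      List.getElem?_take_of_lt h, ← List.getD_eq_getElem?_getD, if_neg (by omega)]
  · rw [List.getD_eq_getElem?_getD, List.getElem?_append_right (by omega), htk, if_pos rfl]
    simp
  · rw [List.getD_eq_getElem?_getD, List.getElem?_append_right (by omega), htk]
    have h1 : k - x = (k - x - 1) + 1 := by omega
    rw [h1, List.getElem?_cons_succ, List.getElem?_drop, ← List.getD_eq_getElem?_getD]
    have h2 : x + 1 + (k - x - 1) = k := by omega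
    rw [h2, if_neg (by omega)]

theorem pvRemStepA_shape (g : List (List Char)) (x y : Nat)
    (hy : y < g.length) (hx : x < (g.getD y []).length) :
    (pvRemStepA g ((x : Int), (y : Int))).length = g.length ∧
    (∀ y' : Nat, ((pvRemStepA g ((x : Int), (y : Int))).getD y' []).length = (g.getD y' []).length) ∧
    (∀ y' x' : Nat, y' < g.length → x' < (g.getD y' []).length →
      ((pvRemStepA g ((x : Int), (y : Int))).getD y' []).getD x' ' '
        = if x' = x ∧ y' = y then '.' else (g.getD y' []).getD x' ' ') := by
  have hrow0 : PySem.List.pyGetD g ((y : Int)) [] = g.getD y [] := PySem.List.pyGetD_natCast g y []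
  have hnew : pvRemStepA g ((x : Int), (y : Int))
      = g.set y ((g.getD y []).take x ++ '.' :: (g.getD y []).drop (x + 1)) := by
    unfold pvRemStepA
    rw [hrow0]
    rw [PySem.List.slice_to _ (by positivity), PySem.List.slice_from _ (by positivity)]
    have h1 : ((x : Int)).toNat = x := by omega
    have h2 : ((x : Int) + 1).toNat = x + 1 := by omega
    simp only [h1, h2, Int.toNat_natCast]
    rw [List.append_assoc, List.singleton_append]
  have hlen : ((g.getD y []).take x ++ '.' :: (g.getD y []).drop (x + 1)).length
      = (g.getD y []).length := by
    rw [List.length_append, List.length_take, List.length_cons, List.length_drop]; omega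
  have hgetSelf : (g.set y ((g.getD y []).take x ++ '.' :: (g.getD y []).drop (x + 1))).getD y []
      = (g.getD y []).take x ++ '.' :: (g.getD y []).drop (x + 1) := by
    rw [List.getD_eq_getElem?_getD, List.getElem?_set_self (by omega)]
    rfl
  have hgetNe : ∀ y' : Nat, y' ≠ y →
      (g.set y ((g.getD y []).take x ++ '.' :: (g.getD y []).drop (x + 1))).getD y' []
        = g.getD y' [] := by
    intro y' h
    rw [List.getD_eq_getElem?_getD, List.getElem?_set_ne (by omega), ← List.getD_eq_getElem?_getD]
  rw [hnew]
  refine ⟨by rw [List.length_set], ?_, ?_⟩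
  · intro y'
    by_cases h : y' = y
    · subst h; rw [hgetSelf, hlen]
    · rw [hgetNe y' h]
  · intro y' x' hy' hx'
    by_cases h : y' = y
    · subst h
      rw [hgetSelf, pvSurgery_getD _ x hx x']
      by_cases hxx : x' = x <;> simp [hxx]
    · rw [hgetNe y' h, if_neg (by tauto)]

def pvValid (g : List (List Char)) (acc : List (Int × Int)) : Prop :=
  ∀ p ∈ acc, ∃ x y : Nat, p = ((x : Int), (y : Int)) ∧ y < g.length ∧ x < (g.getD y []).length

theorem pvFoldA_state (acc : List (Int × Int)) (g : List (List Char)) (r : Int) :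
    acc.foldl (fun (s : List (List Char) × Int × Bool) p =>
        (pvRemStepA s.1 p, s.2.1 + 1, true)) (g, r, false)
      = (pvRemoveAll g acc, r + acc.length, !acc.isEmpty) := by
  have haux : ∀ (t : List (Int × Int)) (g : List (List Char)) (r : Int),
      t.foldl (fun (s : List (List Char) × Int × Bool) p =>
          (pvRemStepA s.1 p, s.2.1 + 1, true)) (g, r, true)
        = (pvRemoveAll g t, r + t.length, true) := by
    intro t
    induction t with
    | nil => intro g r; simp [pvRemoveAll]
    | cons p t ih =>
      intro g r
      rw [List.foldl_cons, ih]
      simp only [pvRemoveAll, List.foldl_cons, Prod.mk.injEq, true_and, and_true]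
      push_cast [List.length_cons]
      ring
  cases acc with
  | nil => simp [pvRemoveAll]
  | cons p t =>
    rw [List.foldl_cons, haux]
    simp only [pvRemoveAll, List.foldl_cons, List.isEmpty_cons, Bool.not_false,
      Prod.mk.injEq, true_and, and_true]
    push_cast [List.length_cons]
    ring

theorem pvRemoveAll_shape (g : List (List Char)) (acc : List (Int × Int)) (hv : pvValid g acc) :
    (pvRemoveAll g acc).length = g.length ∧
    (∀ y : Nat, ((pvRemoveAll g acc).getD y []).length = (g.getD y []).length) ∧
    (∀ y x : Nat, y < g.length → x < (g.getD y []).length →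
      ((pvRemoveAll g acc).getD y []).getD x ' ' =
        if ((x : Int), (y : Int)) ∈ acc then '.' else (g.getD y []).getD x ' ') := by
  induction acc generalizing g with
  | nil => exact ⟨rfl, fun _ => rfl, fun y x _ _ => by simp [pvRemoveAll]⟩
  | cons p t ih =>
    obtain ⟨px, py, rfl, hpy, hpx⟩ := hv p (List.mem_cons_self)
    have hstep := pvRemStepA_shape g px py hpy hpx
    obtain ⟨hlen1, hrow1, hchar1⟩ := hstep
    have hv' : pvValid (pvRemStepA g ((px : Int), (py : Int))) t := by
      intro q hq
      obtain ⟨qx, qy, rfl, h1, h2⟩ := hv q (List.mem_cons_of_mem _ hq)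
      exact ⟨qx, qy, rfl, by omega, by rw [hrow1]; omega⟩
    have hrec := ih (pvRemStepA g ((px : Int), (py : Int))) hv'
    obtain ⟨hlen2, hrow2, hchar2⟩ := hrec
    have hRA : pvRemoveAll g (((px : Int), (py : Int)) :: t)
        = pvRemoveAll (pvRemStepA g ((px : Int), (py : Int))) t := rfl
    refine ⟨by rw [hRA, hlen2, hlen1], fun y => by rw [hRA, hrow2, hrow1], ?_⟩
    intro y x hy hx
    rw [hRA, hchar2 y x (by omega) (by rw [hrow1]; omega),
      hchar1 y x hy hx]
    by_cases hmem : ((x : Int), (y : Int)) ∈ t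
    · simp [hmem]
    · by_cases hhead : x = px ∧ y = py
      · obtain ⟨rfl, rfl⟩ := hhead
        simp [hmem]
      · have : ¬((x : Int), (y : Int)) = ((px : Int), (py : Int)) := by
          simp only [Prod.mk.injEq]
          omega
        simp [hmem, this, hhead]

theorem pvCellsAux_removeAll (g : List (List Char)) (acc : List (Int × Int)) (hv : pvValid g acc) :
    pvCellsAux 0 (pvRemoveAll g acc) = (pvCellsAux 0 g).filter (fun p => decide (p ∉ acc)) := by
  have hrowrel : ∀ (r : List Char) (r' : List Char) (y s : Int), r'.length = r.length →
      (∀ k : Nat, k < r.length → r'.getD k ' ' = if (s + (k : Int), y) ∈ acc then '.'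
        else r.getD k ' ') →
      pvRowPos y s r' = (pvRowPos y s r).filter (fun p => decide (p ∉ acc)) := by
    intro r
    induction r with
    | nil =>
      intro r' y s hlen _
      rw [List.length_nil, List.length_eq_zero_iff] at hlen
      subst hlen
      rfl
    | cons c t ih =>
      intro r' y s hlen hch
      cases r' with
      | nil => simp at hlen
      | cons c' t' =>
        have hc' : c' = if (s, y) ∈ acc then '.' else c := by
          have := hch 0 (by simp)
          simpa using this
        have ht' : pvRowPos y (s + 1) t' = (pvRowPos y (s + 1) t).filter
            (fun p => decide (p ∉ acc)) := by
          apply ih t' y (s + 1) (by simpa using hlen)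
          intro k hk
          have := hch (k + 1) (by simpa using hk)
          have harith : s + ((k + 1 : Nat) : Int) = s + 1 + (k : Int) := by push_cast; ring
          rw [harith] at this
          simpa using this
        by_cases hm : (s, y) ∈ acc
        · by_cases hc : c = '@'
          · simp [pvRowPos, hc', hm, hc, ht']
          · simp [pvRowPos, hc', hm, hc, ht']
        · by_cases hc : c = '@'
          · simp [pvRowPos, hc', hm, hc, ht']
          · simp [pvRowPos, hc', hm, hc, ht']
  have hgridrel : ∀ (t : List (List Char)) (t' : List (List Char)) (s : Int),
      t'.length = t.length →
      (∀ j : Nat, j < t.length → (t'.getD j []).length = (t.getD j []).length ∧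
        (∀ k : Nat, k < (t.getD j []).length →
          (t'.getD j []).getD k ' ' = if ((k : Int), s + (j : Int)) ∈ acc then '.'
            else (t.getD j []).getD k ' ')) →
      pvCellsAux s t' = (pvCellsAux s t).filter (fun p => decide (p ∉ acc)) := by
    intro t
    induction t with
    | nil =>
      intro t' s hlen _
      rw [List.length_nil, List.length_eq_zero_iff] at hlen
      subst hlen
      rfl
    | cons r rest ih =>
      intro t' s hlen hrel
      cases t' with
      | nil => simp at hlen
      | cons r' rest' =>
        have hhead := hrel 0 (by simp)
        have hr' : pvRowPos s 0 r' = (pvRowPos s 0 r).filter (fun p => decide (p ∉ acc)) := by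
          apply hrowrel r r' s 0 (by simpa using hhead.1)
          intro k hk
          have := hhead.2 k (by simpa using hk)
          simpa using this
        have hrest' : pvCellsAux (s + 1) rest' = (pvCellsAux (s + 1) rest).filter
            (fun p => decide (p ∉ acc)) := by
          apply ih rest' (s + 1) (by simpa using hlen)
          intro j hj
          have := hrel (j + 1) (by simpa using hj)
          have harith : s + ((j + 1 : Nat) : Int) = s + 1 + (j : Int) := by push_cast; ring
          rw [harith] at this
          simpa using this
        simp only [pvCellsAux, List.filter_append, hr', hrest']
  obtain ⟨hlen, hrow, hchar⟩ := pvRemoveAll_shape g acc hv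
  apply hgridrel g (pvRemoveAll g acc) 0 hlen
  intro j hj
  refine ⟨hrow j, ?_⟩
  intro k hk
  rw [hchar j k hj hk]
  simp

theorem pvSafe_removeAll (g : List (List Char)) (mx my : Int) (acc : List (Int × Int))
    (hs : pvSafe g mx my) (hv : pvValid g acc) : pvSafe (pvRemoveAll g acc) mx my := by
  obtain ⟨hlen, hrow, hchar⟩ := pvRemoveAll_shape g acc hv
  intro y hy x hx hc d hd hb
  rw [hlen] at hy
  rw [hrow] at hx
  rw [hchar y x hy hx] at hc
  have hnm : ¬(((x : Int), (y : Int)) ∈ acc) := by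
    intro hmem
    rw [if_pos hmem] at hc
    exact absurd hc (by decide)
  rw [if_neg hnm] at hc
  have := hs y hy x hx hc d hd hb
  rw [hrow]
  exact this

theorem pvDegB_mono_extract (cs cs' : List (Int × Int)) (mx my x y : Int)
    (h : pvDegB cs' mx my x y < pvDegB cs mx my x y) :
    ∃ d ∈ pvOffB, (0 ≤ x + d.1 ∧ x + d.1 < mx ∧ 0 ≤ y + d.2 ∧ y + d.2 < my ∧
      (x + d.1, y + d.2) ∈ cs) ∧ (x + d.1, y + d.2) ∉ cs' := by
  by_contra hno
  push Not at hno
  have hmono : pvDegB cs mx my x y ≤ pvDegB cs' mx my x y := by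
    unfold pvDegB
    rw [PySem.List.foldl_ite_add_one, PySem.List.foldl_ite_add_one]
    have := List.countP_mono_left (l := pvOffB)
      (p := fun d => decide (0 ≤ x + d.1 ∧ x + d.1 < mx ∧ 0 ≤ y + d.2 ∧ y + d.2 < my ∧
        (x + d.1, y + d.2) ∈ cs))
      (q := fun d => decide (0 ≤ x + d.1 ∧ x + d.1 < mx ∧ 0 ≤ y + d.2 ∧ y + d.2 < my ∧
        (x + d.1, y + d.2) ∈ cs'))
      (by
        intro d hd hp
        rw [decide_eq_true_iff] at hp ⊢
        obtain ⟨h1, h2, h3, h4, h5⟩ := hp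
        exact ⟨h1, h2, h3, h4, hno d hd ⟨h1, h2, h3, h4, h5⟩⟩)
    omega
  omega

theorem pvValid_scan (g : List (List Char)) (mx my : Int) : pvValid g (pvScanA g mx my) := by
  intro q hq
  rw [pvScanA_eq] at hq
  have hq' := (List.mem_filter.1 hq).1
  rw [mem_pvCellsAux] at hq'
  obtain ⟨j, k, hj, hk, _, rfl⟩ := hq'
  exact ⟨k, j, by simp, hj, hk⟩

theorem pvDiff_eq (g : List (List Char)) (mx my : Int) (light : List (Int × Int))
    (hl : ∀ p, p ∈ light ↔ p ∈ pvScanA g mx my) :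
    PySem.Set.diff (pvCellsAux 0 g) light = pvCellsAux 0 (pvRemoveAll g (pvScanA g mx my)) := by
  show (pvCellsAux 0 g).filter (fun x => !light.contains x)
      = pvCellsAux 0 (pvRemoveAll g (pvScanA g mx my))
  rw [pvCellsAux_removeAll g (pvScanA g mx my) (pvValid_scan g mx my)]
  apply List.filter_congr
  intro q hq
  by_cases h : q ∈ pvScanA g mx my
  · have hql : q ∈ light := (hl q).2 h
    simp [h, hql]
  · have hnl : q ∉ light := fun hx => h ((hl q).1 hx)
    simp [h, hnl]

theorem pvLight'_iff (g : List (List Char)) (mx my : Int) (light : List (Int × Int))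
    (hs : pvSafe g mx my) (hmy : my = (g.length : Int))
    (hl : ∀ p, p ∈ light ↔ p ∈ pvScanA g mx my) (p : Int × Int) :
    p ∈ PySem.Set.ofList ((pvCandB light (PySem.Set.diff (pvCellsAux 0 g) light) mx my).filter
        (fun v => decide (pvDegB (PySem.Set.diff (pvCellsAux 0 g) light) mx my v.1 v.2 < 4)))
      ↔ p ∈ pvScanA (pvRemoveAll g (pvScanA g mx my)) mx my := by
  set acc := pvScanA g mx my with hacc
  set g' := pvRemoveAll g acc with hg'
  have hval : pvValid g acc := pvValid_scan g mx my
  obtain ⟨hglen, hgrow, hgchar⟩ := pvRemoveAll_shape g acc hval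
  have hsafe' : pvSafe g' mx my := pvSafe_removeAll g mx my acc hs hval
  have hmy' : my = (g'.length : Int) := by rw [hg', hglen, hmy]
  have hfilt : pvCellsAux 0 g' = (pvCellsAux 0 g).filter (fun p => decide (p ∉ acc)) :=
    pvCellsAux_removeAll g acc hval
  have hcells' : PySem.Set.diff (pvCellsAux 0 g) light = pvCellsAux 0 g' :=
    pvDiff_eq g mx my light hl
  have hadj' : ∀ q ∈ pvCellsAux 0 g', pvAdjA g' mx my q.1 q.2 = pvDegB (pvCellsAux 0 g') mx my q.1 q.2 := by
    intro q hq
    rw [mem_pvCellsAux] at hq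
    obtain ⟨j, k, hj, hk, hc, rfl⟩ := hq
    simpa using pvAdj_eq_deg g' mx my hsafe' hmy' k j hj hk hc
  rw [hcells']
  rw [PySem.Set.mem_ofList, List.mem_filter, decide_eq_true_iff]
  rw [pvScanA_eq g' mx my, List.mem_filter]
  have hcand : p ∈ pvCandB light (pvCellsAux 0 g') mx my ↔
      (p ∈ PySem.Set.ofList (light.flatMap (fun v =>
        if 0 ≤ v.1 ∧ v.1 < mx ∧ 0 ≤ v.2 ∧ v.2 < my then
          pvOffB.map (fun d => (v.1 - d.1, v.2 - d.2))
        else [])) ∧ p ∈ pvCellsAux 0 g') := by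
    unfold pvCandB
    show p ∈ List.filter (fun x => (pvCellsAux 0 g').contains x) _ ↔ _
    rw [List.mem_filter, List.contains_iff_mem]
  rw [hcand]
  constructor
  · rintro ⟨⟨_, hpc⟩, hdeg⟩
    refine ⟨hpc, ?_⟩
    rw [decide_eq_true_iff, hadj' p hpc]
    exact hdeg
  · rintro ⟨hpc, hadj4⟩
    rw [decide_eq_true_iff, hadj' p hpc] at hadj4
    refine ⟨⟨?_, hpc⟩, hadj4⟩
    have hpfilt := hpc
    rw [hfilt, List.mem_filter, decide_eq_true_iff] at hpfilt
    obtain ⟨hpcells, hpnacc⟩ := hpfilt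
    have hpnl : p ∉ light := fun hx => hpnacc ((hl p).1 hx)
    have hcoords := hpcells
    rw [mem_pvCellsAux] at hcoords
    obtain ⟨j, k, hj, hk, hc, hpeq⟩ := hcoords
    have hdegfull : 4 ≤ pvDegB (pvCellsAux 0 g) mx my p.1 p.2 := by
      by_contra hlt
      apply hpnacc
      rw [hacc, pvScanA_eq, List.mem_filter]
      refine ⟨hpcells, ?_⟩
      rw [decide_eq_true_iff]
      have : pvAdjA g mx my p.1 p.2 = pvDegB (pvCellsAux 0 g) mx my p.1 p.2 := by
        subst hpeq
        simpa using pvAdj_eq_deg g mx my hs hmy k j hj hk hc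
      omega
    have hdrop : pvDegB (pvCellsAux 0 g') mx my p.1 p.2 < pvDegB (pvCellsAux 0 g) mx my p.1 p.2 := by
      omega
    obtain ⟨d, hd, ⟨hb1, hb2, hb3, hb4, hwin⟩, hwout⟩ :=
      pvDegB_mono_extract (pvCellsAux 0 g) (pvCellsAux 0 g') mx my p.1 p.2 hdrop
    have hwl : (p.1 + d.1, p.2 + d.2) ∈ light := by
      by_contra hwl
      apply hwout
      rw [hfilt, List.mem_filter, decide_eq_true_iff]
      refine ⟨hwin, fun hxacc => hwl ((hl _).2 hxacc)⟩
    rw [PySem.Set.mem_ofList, List.mem_flatMap]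
    refine ⟨(p.1 + d.1, p.2 + d.2), hwl, ?_⟩
    rw [if_pos ⟨hb1, hb2, hb3, hb4⟩]
    rw [List.mem_map]
    exact ⟨d, hd, by simp⟩

theorem pvLoop_eq (mx my : Int) (fuel : Nat) :
    ∀ (g : List (List Char)) (light : List (Int × Int)) (removed : Int),
      pvSafe g mx my → my = (g.length : Int) → light.Nodup →
      (∀ p, p ∈ light ↔ p ∈ pvScanA g mx my) →
      pvLoopA true mx my fuel g removed = pvLoopB mx my fuel (pvCellsAux 0 g) light removed := by
  induction fuel with
  | zero => intro g light removed _ _ _ _; rfl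
  | succ fuel ih =>
    intro g light removed hs hmy hnd hl
    have hndacc : (pvScanA g mx my).Nodup := nodup_pvScanA g mx my
    have hperm : light.Perm (pvScanA g mx my) := (List.perm_ext_iff_of_nodup hnd hndacc).2 hl
    have hlen : light.length = (pvScanA g mx my).length := hperm.length_eq
    simp only [pvLoopA, pvLoopB, Bool.not_true, Bool.false_eq_true, if_false]
    rw [pvFoldA_state]
    by_cases hempty : pvScanA g mx my = []
    · have hlempty : light = [] := by
        rw [List.eq_nil_iff_forall_not_mem]
        intro x hx
        have := (hl x).1 hx
        rw [hempty] at this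
        exact absurd this (List.not_mem_nil)
      rw [hempty, hlempty]
      simp
    · have hlne : light ≠ [] := by
        intro h0
        apply hempty
        rw [List.eq_nil_iff_forall_not_mem]
        intro x hx
        have := (hl x).2 hx
        rw [h0] at this
        exact absurd this (List.not_mem_nil)
      have hAflag : (pvScanA g mx my).isEmpty = false := by
        simpa [List.isEmpty_iff] using hempty
      have hBflag : light.isEmpty = false := by
        simpa [List.isEmpty_iff] using hlne
      rw [hAflag, hBflag]
      simp only [Bool.not_false, if_true, Bool.false_eq_true, if_false]
      have hrem : removed + PySem.Set.len light = removed + ((pvScanA g mx my).length : Int) := by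
        show removed + (light.length : Int) = _
        rw [hlen]
      rw [hrem]
      have hval := pvValid_scan g mx my
      obtain ⟨hglen, _, _⟩ := pvRemoveAll_shape g (pvScanA g mx my) hval
      have hdiff := pvDiff_eq g mx my light hl
      have hli := fun p => pvLight'_iff g mx my light hs hmy hl p
      rw [hdiff] at hli ⊢
      exact ih (pvRemoveAll g (pvScanA g mx my)) _ _
        (pvSafe_removeAll g mx my (pvScanA g mx my) hs hval)
        (by rw [hglen, ← hmy])
        (PySem.Set.nodup_ofList _)
        hli


-- ===== VERDICT (by name: the statement is the Claim_ definition above) =====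
theorem pvLightB_eq (g : List (List Char)) (mx my : Int)
    (hs : pvSafe g mx my) (hmy : my = (g.length : Int)) :
    pvLightB (pvCellsAux 0 g) mx my = pvScanA g mx my := by
  unfold pvLightB
  rw [PySem.Set.ofList_eq_self_of_nodup _ ((nodup_pvCellsAux g 0).filter _)]
  rw [pvScanA_eq]
  symm
  apply List.filter_congr
  intro q hq
  rw [mem_pvCellsAux] at hq
  obtain ⟨j, k, hj, hk, hc, rfl⟩ := hq
  have := pvAdj_eq_deg g mx my hs hmy k j hj hk hc
  simp only [zero_add] at this ⊢
  rw [this]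

theorem paper_stacks_spec : Claim_equal_paper_stacks := by
  intro data p2 _ hpre
  unfold Spec_paper_stacks
  obtain ⟨hne, hsafe⟩ := hpre
  simp only [paper_stacks, paper_stacks_alt]
  have hmx0 : PySem.List.pyGetD (PySem.Chars.splitlines data.toList) 0 []
      = (PySem.Chars.splitlines data.toList).getD 0 [] := by
    rw [PySem.List.pyGetD_of_nonneg _ _ (by omega : (0 : Int) ≤ 0)]
    rfl
  rw [hmx0]
  set g := PySem.Chars.splitlines data.toList with hg
  set mx : Int := ((g.getD 0 []).length : Int) with hmx
  set my : Int := ((g.length : Nat) : Int) with hmy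
  have hcells : pvCellsB g = pvCellsAux 0 g := by
    unfold pvCellsB
    rw [pvCellsAux_eq_flatMap]
    exact PySem.Set.ofList_eq_self_of_nodup _ (nodup_pvCellsAux g 0)
  rw [hcells]
  rw [pvLightB_eq g mx my hsafe rfl]
  cases p2 with
  | false =>
    simp only [pvLoopA, Bool.not_false, if_true]
    rfl
  | true =>
    simp only [Bool.not_true, Bool.false_eq_true, if_false]
    have hfuel : (pvCellsAux 0 g).length + 1 = pvCountAtA g + 1 := by
      rw [length_pvCellsAux]
    rw [hfuel]
    exact pvLoop_eq mx my (pvCountAtA g + 1) g (pvScanA g mx my) 0 hsafe rfl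
      (nodup_pvScanA g mx my) (fun p => Iff.rfl)
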